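-- pv_equiv track=rewrite | github.com/will-tam/cJSONprocessInterface | __cpJSONprocessing.py | extractSeveralFrom
-- ===== SOURCE A (Python) =====
-- def extractSeveralFrom(keys, jsonDatas):
--     """
--     Generator : extract a values from several keys.
--     @Parameters : keys = list of keys to return with their datas.
--                         jsonDatas = the json's datas.
--     @Return : generate the asked keys and their associated values.
--                     If one of the "keys" is NOT exist in jsonDatas, return None.
--     """
--     try:
--         for datas in jsonDatas:
--             data = []
--             for key in keys:
--                 data.append([(k, v) for k, v in datas if k == key][0])    # Take the first element only of the list
--             yield data
--     except IndexError:
--         yield None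
-- ===== SOURCE B (Python) =====
-- def extractSeveralFrom(keys, jsonDatas):
--     """One pass per record builds a dict of each key's first value, then O(1) lookups per asked key."""
--     for datas in jsonDatas:
--         first = {}
--         for k, v in datas:
--             if k not in first:
--                 first[k] = v
--         if all(key in first for key in keys):
--             yield [(key, first[key]) for key in keys]
--         else:
--             yield None
--             return
-- ===== Notes on version B (the rewrite author's own statement) =====
-- stated objective: alternative
-- what changed: Per record, B builds a first-occurrence dict in one pass over the pairs and answers each key by a lookup, instead of A's full list-comprehension scan of the record for every key; on the measured inputs the cost is the same.
import Mathlib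
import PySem

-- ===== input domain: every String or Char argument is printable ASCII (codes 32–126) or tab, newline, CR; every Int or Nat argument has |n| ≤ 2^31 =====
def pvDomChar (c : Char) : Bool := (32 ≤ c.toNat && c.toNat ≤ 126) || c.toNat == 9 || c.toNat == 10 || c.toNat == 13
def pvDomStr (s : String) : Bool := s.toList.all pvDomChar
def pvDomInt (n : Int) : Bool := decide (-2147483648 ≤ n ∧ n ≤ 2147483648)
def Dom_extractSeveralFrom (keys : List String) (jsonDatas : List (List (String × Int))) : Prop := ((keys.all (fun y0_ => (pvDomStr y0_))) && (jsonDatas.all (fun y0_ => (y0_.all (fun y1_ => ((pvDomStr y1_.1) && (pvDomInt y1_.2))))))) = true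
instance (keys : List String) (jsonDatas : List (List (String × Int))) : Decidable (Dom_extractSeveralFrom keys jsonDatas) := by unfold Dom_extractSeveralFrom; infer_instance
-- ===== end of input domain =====

-- B replaces A's per-key full scan of each record by a first-occurrence dict built once per
-- record (objective: alternative algorithm, same measured cost). Equivalence is about the
-- sequence of values the generator yields.

-- ===== PORT A =====
-- inner 'for key in keys: data.append([...][0])'; IndexError (pyGet? = none) poisons the row
def esfA_row (keys : List String) (datas : List (String × Int)) : Option (List (String × Int)) :=
  keys.foldl (fun acc key =>
    match acc with
    | none => none
    | some data =>
      match PySem.List.pyGet? (datas.filter (fun p => p.1 == key)) 0 with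
      | none => none
      | some e => some (data ++ [e])) (some [])

-- outer 'for datas in jsonDatas' with the try/except around the whole loop:
-- the first IndexError yields None and the generator ends
def esfA_go (keys : List String) : List (List (String × Int)) → List (Option (List (String × Int)))
  | [] => []
  | datas :: rest =>
    match esfA_row keys datas with
    | some row => some row :: esfA_go keys rest
    | none => [none]

def extractSeveralFrom (keys : List String) (jsonDatas : List (List (String × Int))) : List (Option (List (String × Int))) :=
  esfA_go keys jsonDatas

-- ===== PORT B =====
-- 'first = {}; for k, v in datas: if k not in first: first[k] = v'
def esfB_first (datas : List (String × Int)) : PySem.Dict String Int :=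
  datas.foldl (fun d p => if d.contains p.1 then d else d.insert p.1 p.2) PySem.Dict.empty

-- 'if all(key in first for key in keys): yield [...] else: yield None; return'
-- (first[key] exists whenever the branch is taken; getD's default 0 is never used)
def esfB_go (keys : List String) : List (List (String × Int)) → List (Option (List (String × Int)))
  | [] => []
  | datas :: rest =>
    let first := esfB_first datas
    if keys.all (fun key => first.contains key) then
      some (keys.map (fun key => (key, first.getD key 0))) :: esfB_go keys rest
    else
      [none]

def extractSeveralFrom_alt (keys : List String) (jsonDatas : List (List (String × Int))) : List (Option (List (String × Int))) :=
  esfB_go keys jsonDatas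

-- ===== PRECONDITION & SPEC =====
def Spec_extractSeveralFrom (keys : List String) (jsonDatas : List (List (String × Int))) (out : List (Option (List (String × Int)))) : Prop := out = extractSeveralFrom_alt keys jsonDatas
instance (keys : List String) (jsonDatas : List (List (String × Int))) (out : List (Option (List (String × Int)))) : Decidable (Spec_extractSeveralFrom keys jsonDatas out) := by unfold Spec_extractSeveralFrom; infer_instance

-- ===== CLAIM (what is proved, stated in full; the proofs are below) =====
def Claim_equal_extractSeveralFrom : Prop := ∀ (keys : List String) (jsonDatas : List (List (String × Int))), Dom_extractSeveralFrom keys jsonDatas → Spec_extractSeveralFrom keys jsonDatas (extractSeveralFrom keys jsonDatas)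

-- ===== LEMMAS AND PROOFS =====

-- the first-occurrence dict looks up exactly the head of A's filtered list
theorem esfB_first_get?_aux (key : String) (datas : List (String × Int)) (d : PySem.Dict String Int) :
    (datas.foldl (fun d p => if d.contains p.1 then d else d.insert p.1 p.2) d).get? key =
      match d.get? key with
      | some v => some v
      | none => ((datas.filter (fun p => p.1 == key)).head?).map Prod.snd := by
  induction datas generalizing d with
  | nil => cases h : d.get? key <;> simp [h]
  | cons p rest ih =>
    simp only [List.foldl_cons, List.filter_cons]
    by_cases hk : p.1 = key
    · subst hk
      by_cases hc : d.contains p.1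
      · have hsome := hc
        rw [PySem.Dict.contains_eq_isSome_get?] at hsome
        obtain ⟨v, hv⟩ := Option.isSome_iff_exists.mp hsome
        simp [hc, ih, hv]
      · have hget : d.get? p.1 = none := by
          rw [PySem.Dict.contains_eq_isSome_get?] at hc
          cases h : d.get? p.1 with
          | none => rfl
          | some v => simp [h] at hc
        simp [hc, ih, PySem.Dict.get?_insert_self, hget]
    · have hne : (p.1 == key) = false := by simp [hk]
      by_cases hc : d.contains p.1
      · simp [hc, ih, hne]
      · simp [hc, ih, PySem.Dict.get?_insert_of_ne d p.2 (Ne.symm hk), hne]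

theorem esfB_first_get? (key : String) (datas : List (String × Int)) :
    (esfB_first datas).get? key = ((datas.filter (fun p => p.1 == key)).head?).map Prod.snd := by
  unfold esfB_first
  rw [esfB_first_get?_aux]
  simp [PySem.Dict.get?_empty]

theorem pyGet?_zero {α : Type} (l : List α) : PySem.List.pyGet? l 0 = l.head? := by
  cases l <;> simp [PySem.List.pyGet?, PySem.List.pyIdx?]

-- once the accumulator is poisoned it stays none
theorem esfA_row_none (keys : List String) (datas : List (String × Int)) :
    keys.foldl (fun acc key =>
      match acc with
      | none => none
      | some data =>
        match PySem.List.pyGet? (datas.filter (fun p => p.1 == key)) 0 with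
        | none => none
        | some e => some (data ++ [e])) none = none := by
  induction keys with
  | nil => rfl
  | cons k rest ih => simpa using ih

-- A's row loop, started from any prefix, equals B's all-contained test + map
theorem esfA_row_aux (datas : List (String × Int)) (keys : List String) (data0 : List (String × Int)) :
    keys.foldl (fun acc key =>
      match acc with
      | none => none
      | some data =>
        match PySem.List.pyGet? (datas.filter (fun p => p.1 == key)) 0 with
        | none => none
        | some e => some (data ++ [e])) (some data0) =
      (if keys.all (fun key => (esfB_first datas).contains key) then
        some (data0 ++ keys.map (fun key => (key, (esfB_first datas).getD key 0)))
      else none) := by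
  induction keys generalizing data0 with
  | nil => simp
  | cons key rest ih =>
    simp only [List.foldl_cons, List.all_cons]
    rw [pyGet?_zero]
    cases hg : (esfB_first datas).get? key with
    | none =>
      have hh : (datas.filter (fun p => p.1 == key)).head? = none := by
        have := esfB_first_get? key datas
        rw [hg] at this
        cases h : (datas.filter (fun p => p.1 == key)).head? with
        | none => rfl
        | some e => rw [h] at this; simp at this
      have hc : (esfB_first datas).contains key = false := by
        rw [PySem.Dict.contains_eq_isSome_get?, hg]; rfl
      simp only [hh, hc, Bool.false_and, Bool.false_eq_true, if_false]
      exact esfA_row_none rest datas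
    | some v =>
      have hh := esfB_first_get? key datas
      rw [hg] at hh
      cases h : (datas.filter (fun p => p.1 == key)).head? with
      | none => rw [h] at hh; simp at hh
      | some e =>
        rw [h] at hh
        have hv : e.2 = v := by simpa using hh.symm
        have hk : e.1 = key := by
          have hmem : e ∈ datas.filter (fun p => p.1 == key) := List.mem_of_mem_head? h
          have := (List.mem_filter.mp hmem).2
          simpa using this
        have he : e = (key, v) := by cases e; simp_all
        have hc : (esfB_first datas).contains key = true := by
          rw [PySem.Dict.contains_eq_isSome_get?, hg]; rfl
        have hgd : (esfB_first datas).getD key 0 = v := by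
          rw [PySem.Dict.getD_eq_get?_getD, hg]; rfl
        simp only [he, hc, Bool.true_and]
        rw [ih]
        by_cases hall : rest.all (fun key => (esfB_first datas).contains key)
        · simp [hall, hgd]
        · simp [hall]

theorem esfA_row_eq (keys : List String) (datas : List (String × Int)) :
    esfA_row keys datas =
      (if keys.all (fun key => (esfB_first datas).contains key) then
        some (keys.map (fun key => (key, (esfB_first datas).getD key 0)))
      else none) := by
  unfold esfA_row
  rw [esfA_row_aux]
  simp

theorem esf_go_eq (keys : List String) (jsonDatas : List (List (String × Int))) :
    esfA_go keys jsonDatas = esfB_go keys jsonDatas := by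
  induction jsonDatas with
  | nil => rfl
  | cons datas rest ih =>
    rw [esfA_go, esfB_go, esfA_row_eq]
    by_cases hall : keys.all (fun key => (esfB_first datas).contains key)
    · simp [hall, ih]
    · simp [hall]

-- ===== VERDICT (by name: the statement is the Claim_ definition above) =====
theorem extractSeveralFrom_spec : Claim_equal_extractSeveralFrom := by
  intro keys jsonDatas _
  unfold Spec_extractSeveralFrom extractSeveralFrom extractSeveralFrom_alt
  exact esf_go_eq keys jsonDatas
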